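-- pv_equiv track=rewrite | github.com/BOJ-expedition/Challenges-of-the-week | 2021W07/q/1835.py | solution
-- ===== SOURCE A (Python) =====
-- def solution(n, data):
--   c = 0
--   import itertools
--   for p in itertools.permutations("ACFJMNRT"):
--     for v in data:
--       a, _, b, o, d = v
--       if a not in p or b not in p:
--         break
--       i, j = p.index(a), p.index(b)
--       d, l = int(d), abs(i - j) - 1
--       if o == '=' and l != d:
--         break
--       elif o == '>' and l <= d:
--         break
--       elif o == '<' and l >= d:
--         break
--     else:
--       c += 1
--   return c
-- ===== SOURCE B (Python) =====
-- LETTERS = ["A", "C", "F", "J", "M", "N", "R", "T"]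
--
--
-- def solution(n, data):
--     # Consume constraints in order while the front one has both letters placed:
--     # check it (parsing its distance lazily) and drop it; defer at the first
--     # constraint with an unplaced alphabet letter; fail on a non-alphabet letter.
--     def consume(s, pend):
--         while pend:
--             a, _, b, o, d = pend[0]
--             if a not in s:
--                 return None if a not in LETTERS else pend
--             if b not in s:
--                 return None if b not in LETTERS else pend
--             l = abs(s.index(a) - s.index(b)) - 1
--             d = int(d)
--             if o == '=' and l != d:
--                 return None
--             if o == '>' and l <= d:
--                 return None
--             if o == '<' and l >= d:
--                 return None
--             pend = pend[1:]
--         return pend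
--
--     # Backtracking: place the 8 letters one at a time; each placement consumes
--     # the now-checkable prefix of the remaining constraints or prunes the branch.
--     def bt(s, pend):
--         if len(s) == 8:
--             return 1
--         t = 0
--         for a in LETTERS:
--             if a in s:
--                 continue
--             p2 = consume(s + [a], pend)
--             if p2 is not None:
--                 t += bt(s + [a], p2)
--         return t
--
--     p0 = consume([], list(data))
--     return 0 if p0 is None else bt([], p0)
-- ===== Notes on version B (the rewrite author's own statement) =====
-- stated objective: faster
-- what changed: Replaces the exhaustive scan over all 40320 complete orderings with recursive backtracking that places the 8 letters one at a time and incrementally consumes the constraint list, checking (and lazily parsing) each constraint as soon as both its letters are placed and pruning the branch at the first violation or non-alphabet letter.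
-- outside the precondition, e.g. on solution(0, [('A', '', 'A', '=', '5'), ('A', '', 'C', '=', 'y')]): A returns 0, B returns 0; on solution(0, [('F', '', 'J', '>', '10'), ('A', '', 'C', '=', 'x')]): A returns 0, B returns 0
import Mathlib
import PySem

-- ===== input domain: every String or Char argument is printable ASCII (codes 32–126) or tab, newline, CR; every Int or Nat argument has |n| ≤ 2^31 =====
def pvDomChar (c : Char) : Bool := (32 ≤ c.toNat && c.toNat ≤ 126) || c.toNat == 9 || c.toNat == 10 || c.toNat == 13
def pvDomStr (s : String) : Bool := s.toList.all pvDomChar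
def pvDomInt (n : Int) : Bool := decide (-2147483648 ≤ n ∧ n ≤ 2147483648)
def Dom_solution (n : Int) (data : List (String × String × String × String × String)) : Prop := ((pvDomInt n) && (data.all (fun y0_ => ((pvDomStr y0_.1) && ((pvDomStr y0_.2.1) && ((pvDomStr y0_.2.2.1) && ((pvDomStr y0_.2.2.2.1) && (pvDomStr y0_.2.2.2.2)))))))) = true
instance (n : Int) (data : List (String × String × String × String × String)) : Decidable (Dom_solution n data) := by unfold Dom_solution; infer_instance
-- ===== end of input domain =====

-- B replaces the scan of all 40320 complete orderings with a pruned backtracking search that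
-- consumes the constraint list incrementally (return value only; neither program mutates its arguments).

-- ===== PORT A =====
-- the 8 letters "ACFJMNRT"; itertools.permutations over them yields tuples of 1-char strings
def alphaA : List String := ["A", "C", "F", "J", "M", "N", "R", "T"]

-- the inner `for v in data: … else:` loop of A for one permutation p:
-- true ⟺ the loop finishes without `break` (the `else` branch runs, c += 1)
def checkA (p : List String) : List (String × String × String × String × String) → Bool
  | [] => true
  | v :: rest =>
    if v.1 ∉ p ∨ v.2.2.1 ∉ p then false
    else
      match PySem.List.index? p v.1, PySem.List.index? p v.2.2.1, PySem.Int.ofStr? v.2.2.2.2 with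
      | some i, some j, some dv =>
          let l : Int := ((i : Int) - (j : Int)).natAbs - 1
          if v.2.2.2.1 == "=" && l != dv then false
          else if v.2.2.2.1 == ">" && decide (l ≤ dv) then false
          else if v.2.2.2.1 == "<" && decide (dv ≤ l) then false
          else checkA p rest
      | _, _, _ => false
      -- index? is some here (membership was checked); ofStr? none = ValueError in Python, outside Pre_

def solution (n : Int) (data : List (String × String × String × String × String)) : Int :=
  (PySem.List.permutations alphaA 8).foldl (fun c p => if checkA p data then c + 1 else c) 0

-- ===== PORT B =====
def bLET : List String := ["A", "C", "F", "J", "M", "N", "R", "T"]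

-- consume(s, pend) of Source B: pop and check front constraints while both letters are placed
-- (parsing the distance lazily); defer (return the residual) at the first constraint with an
-- unplaced alphabet letter; none = the branch is pruned (a non-alphabet letter or a failed check)
def consumeB (s : List String) :
    List (String × String × String × String × String) →
    Option (List (String × String × String × String × String))
  | [] => some []
  | v :: rest =>
    if v.1 ∉ s then (if v.1 ∉ bLET then none else some (v :: rest))
    else if v.2.2.1 ∉ s then (if v.2.2.1 ∉ bLET then none else some (v :: rest))
    else
      match PySem.List.index? s v.1, PySem.List.index? s v.2.2.1, PySem.Int.ofStr? v.2.2.2.2 with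
      | some i, some j, some dv =>
          let l : Int := ((i : Int) - (j : Int)).natAbs - 1
          if v.2.2.2.1 == "=" && l != dv then none
          else if v.2.2.2.1 == ">" && decide (l ≤ dv) then none
          else if v.2.2.2.1 == "<" && decide (dv ≤ l) then none
          else consumeB s rest
      | _, _, _ => none
      -- index? is some here (membership was checked); ofStr? none = ValueError in Python, outside Pre_

-- bt(s, pend) of Source B; the `len(s) == 8` stop test is carried as the fuel k = 8 - len(s)
def btB : Nat → List String → List (String × String × String × String × String) → Int
  | 0, _, _ => 1
  | k + 1, s, pend =>
      bLET.foldl (fun t a =>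
        if a ∈ s then t
        else match consumeB (s ++ [a]) pend with
          | none => t
          | some p2 => t + btB k (s ++ [a]) p2) 0

def solution_alt (n : Int) (data : List (String × String × String × String × String)) : Int :=
  match consumeB [] data with
  | none => 0
  | some p0 => btB 8 [] p0

-- ===== PRECONDITION & SPEC =====
-- Pre_ excludes data containing a constraint over two alphabet letters whose distance string
-- int() cannot parse: whenever such a constraint is reached both programs raise ValueError, and
-- 'it is reached' is not a closed-form condition, so Pre_ is slightly conservative — on the
-- excluded inputs where an earlier failing constraint shields the parse and A returns 0,
-- B returns 0 as well (see the cited examples).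
def Pre_solution (n : Int) (data : List (String × String × String × String × String)) : Prop :=
  ∀ v ∈ data,
    (v.1 ∈ (["A", "C", "F", "J", "M", "N", "R", "T"] : List String) ∧
     v.2.2.1 ∈ (["A", "C", "F", "J", "M", "N", "R", "T"] : List String)) →
    (PySem.Int.ofStr? v.2.2.2.2).isSome = true
instance (n : Int) (data : List (String × String × String × String × String)) : Decidable (Pre_solution n data) := by unfold Pre_solution; infer_instance

def pvWitness_solution : Int × (List (String × String × String × String × String)) :=
  (0, [("A", "to", "C", "<", "2"), ("M", "to", "T", "=", "0")])

def Spec_solution (n : Int) (data : List (String × String × String × String × String)) (out : Int) : Prop := out = solution_alt n data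
instance (n : Int) (data : List (String × String × String × String × String)) (out : Int) : Decidable (Spec_solution n data out) := by unfold Spec_solution; infer_instance

-- ===== CLAIM (what is proved, stated in full; the proofs are below) =====
def Claim_equal_solution : Prop := ∀ (n : Int) (data : List (String × String × String × String × String)), Dom_solution n data → Pre_solution n data → Spec_solution n data (solution n data)

-- ===== LEMMAS AND PROOFS =====

-- proof-side: the (picked element, remainder) decomposition behind itertools.permutations
def selP {α : Type} : List α → List (α × List α)
  | [] => []
  | x :: xs => (x, xs) :: (selP xs).map (fun q => (q.1, x :: q.2))

theorem selP_map_fst {α : Type} (l : List α) : (selP l).map Prod.fst = l := by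
  induction l with
  | nil => rfl
  | cons x xs ih => simp [selP, List.map_map, Function.comp_def, ih]

theorem selP_mem {α : Type} [DecidableEq α] {l : List α} (hnd : l.Nodup) :
    ∀ q ∈ selP l, q.1 ∈ l ∧ q.2 = l.erase q.1 := by
  induction l with
  | nil => simp [selP]
  | cons x xs ih =>
    intro q hq
    simp only [selP, List.mem_cons, List.mem_map] at hq
    rcases hq with rfl | ⟨q', hq', rfl⟩
    · simp
    · have hnd' : xs.Nodup := hnd.of_cons
      obtain ⟨h1, h2⟩ := ih hnd' q' hq'
      have hne : x ≠ q'.1 := by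
        rintro rfl; exact (List.nodup_cons.mp hnd).1 h1
      refine ⟨List.mem_cons_of_mem _ h1, ?_⟩
      simp [List.erase_cons_tail, hne, ← h2]

theorem foldl_count {α : Type} (P : α → Bool) :
    ∀ (l : List α) (c : Int),
      l.foldl (fun c p => if P p then c + 1 else c) c = c + l.countP P := by
  intro l
  induction l with
  | nil => simp
  | cons x xs ih =>
    intro c
    by_cases h : P x <;> simp [List.countP_cons, h, ih] <;> ring

theorem flatMap_range_eq_selP {α β : Type} :
    ∀ (xs : List α) (G : α → List α → List β),
      (List.range xs.length).flatMap
          (fun i => match xs[i]? with | none => [] | some a => G a (xs.eraseIdx i))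
        = (selP xs).flatMap (fun q => G q.1 q.2) := by
  intro xs
  induction xs with
  | nil => intro G; rfl
  | cons x t ih =>
    intro G
    rw [List.length_cons, List.range_succ_eq_map]
    simp only [List.flatMap_cons, List.getElem?_cons_zero, List.eraseIdx_cons_zero,
      List.flatMap_map, List.getElem?_cons_succ, List.eraseIdx_cons_succ]
    rw [ih (fun a l => G a (x :: l))]
    simp [selP, List.flatMap_map]

theorem perms_succ {α : Type} (xs : List α) (r : Nat) :
    PySem.List.permutations xs (r + 1)
      = (selP xs).flatMap (fun q => (PySem.List.permutations q.2 r).map (q.1 :: ·)) := by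
  rw [show PySem.List.permutations xs (r + 1)
      = (List.range xs.length).flatMap
          (fun i => match xs[i]? with
            | none => []
            | some a => (PySem.List.permutations (xs.eraseIdx i) r).map (a :: ·)) from rfl]
  exact flatMap_range_eq_selP xs (fun a l => (PySem.List.permutations l r).map (a :: ·))

theorem len_filter_flatMap {α β : Type} (g : α → List β) (P : β → Bool) :
    ∀ (l : List α),
      ((l.flatMap g).filter P).length
        = (l.map (fun q => ((g q).filter P).length)).sum := by
  intro l
  induction l with
  | nil => rfl
  | cons x xs ih => simp [List.flatMap_cons, List.filter_append, ih]

theorem bLET_nodup : bLET.Nodup := by decide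

-- the consume loop against A's check: on a full ordering q compatible with the partial s,
-- a pruned pend means A's loop breaks, and consuming preserves A's verdict
theorem consume_checkA (q : List String) (hq : ∀ x : String, x ∈ q ↔ x ∈ bLET)
    (s : List String) (hs : ∀ x ∈ s, PySem.List.index? q x = PySem.List.index? s x) :
    ∀ pend, (match consumeB s pend with
      | none => checkA q pend = false
      | some p' => checkA q pend = checkA q p') := by
  have hmemq : ∀ x ∈ s, x ∈ q := by
    intro x hx
    have := (PySem.List.index?_isSome_iff s x).mpr hx
    have h2 : (PySem.List.index? q x).isSome = true := by rw [hs x hx]; exact this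
    exact (PySem.List.index?_isSome_iff q x).mp h2
  intro pend
  induction pend with
  | nil => simp [consumeB]
  | cons v rest ih =>
    by_cases h1 : v.1 ∈ s
    · by_cases h2 : v.2.2.1 ∈ s
      · have h1q := hmemq _ h1
        have h2q := hmemq _ h2
        obtain ⟨i, hi⟩ := Option.isSome_iff_exists.mp ((PySem.List.index?_isSome_iff s v.1).mpr h1)
        obtain ⟨j, hj⟩ := Option.isSome_iff_exists.mp ((PySem.List.index?_isSome_iff s v.2.2.1).mpr h2)
        have hiq : PySem.List.index? q v.1 = some i := by rw [hs _ h1, hi]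
        have hjq : PySem.List.index? q v.2.2.1 = some j := by rw [hs _ h2, hj]
        have hgq : ¬ (v.1 ∉ q ∨ v.2.2.1 ∉ q) := by simp [h1q, h2q]
        have hgs : ¬ (v.1 ∉ s) := by simp [h1]
        have hgs2 : ¬ (v.2.2.1 ∉ s) := by simp [h2]
        cases hd : PySem.Int.ofStr? v.2.2.2.2 with
        | none =>
          simp only [consumeB, if_neg hgs, if_neg hgs2, hi, hj, hd]
          simp only [checkA, if_neg hgq, hiq, hjq, hd]
        | some dv =>
          simp only [consumeB, if_neg hgs, if_neg hgs2, hi, hj, hd]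
          simp only [checkA, if_neg hgq, hiq, hjq, hd]
          by_cases c1 : (v.2.2.2.1 == "=" && (((i : Int) - (j : Int)).natAbs - 1 : Int) != dv) = true
          · simp only [c1, if_pos rfl]; simp
          · rw [Bool.not_eq_true] at c1
            simp only [c1, Bool.false_eq_true, if_false]
            by_cases c2 : (v.2.2.2.1 == ">" && decide ((((i : Int) - (j : Int)).natAbs - 1 : Int) ≤ dv)) = true
            · simp only [c2, if_pos rfl]; simp
            · rw [Bool.not_eq_true] at c2
              simp only [c2, Bool.false_eq_true, if_false]
              by_cases c3 : (v.2.2.2.1 == "<" && decide ((dv : Int) ≤ (((i : Int) - (j : Int)).natAbs - 1 : Int))) = true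
              · simp only [c3, if_pos rfl]; simp
              · rw [Bool.not_eq_true] at c3
                simp only [c3, Bool.false_eq_true, if_false]
                exact ih
      · have hgs : ¬ (v.1 ∉ s) := by simp [h1]
        by_cases hb : v.2.2.1 ∈ bLET
        · simp only [consumeB, if_neg hgs, if_pos h2, if_neg (show ¬ v.2.2.1 ∉ bLET by simp [hb])]
        · have hbq : v.2.2.1 ∉ q := fun hx => hb ((hq _).mp hx)
          simp only [consumeB, if_neg hgs, if_pos h2, if_pos hb]
          simp [checkA, hbq]
    · by_cases ha : v.1 ∈ bLET
      · simp only [consumeB, if_pos h1, if_neg (show ¬ v.1 ∉ bLET by simp [ha])]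
      · have haq : v.1 ∉ q := fun hx => ha ((hq _).mp hx)
        simp only [consumeB, if_pos h1, if_pos ha]
        simp [checkA, haq]

-- consuming is idempotent: the residual it returns is stable
theorem consume_idem (s : List String) :
    ∀ pend p', consumeB s pend = some p' → consumeB s p' = some p' := by
  intro pend
  induction pend with
  | nil =>
    intro p' h
    simp only [consumeB, Option.some.injEq] at h
    subst h; rfl
  | cons v rest ih =>
    intro p' h
    by_cases h1 : v.1 ∈ s
    · by_cases h2 : v.2.2.1 ∈ s
      · obtain ⟨i, hi⟩ := Option.isSome_iff_exists.mp ((PySem.List.index?_isSome_iff s v.1).mpr h1)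
        obtain ⟨j, hj⟩ := Option.isSome_iff_exists.mp ((PySem.List.index?_isSome_iff s v.2.2.1).mpr h2)
        simp only [consumeB, if_neg (not_not_intro h1), if_neg (not_not_intro h2), hi, hj] at h
        cases hd : PySem.Int.ofStr? v.2.2.2.2 with
        | none => rw [hd] at h; cases h
        | some dv =>
          rw [hd] at h
          simp only [] at h
          split at h
          · cases h
          · split at h
            · cases h
            · split at h
              · cases h
              · exact ih p' h
      · by_cases hb : v.2.2.1 ∉ bLET
        · simp only [consumeB, if_neg (not_not_intro h1), if_pos h2, if_pos hb] at h
          cases h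
        · simp only [consumeB, if_neg (not_not_intro h1), if_pos h2, if_neg hb,
            Option.some.injEq] at h
          subst h
          simp only [consumeB, if_neg (not_not_intro h1), if_pos h2, if_neg hb]
    · by_cases ha : v.1 ∉ bLET
      · simp only [consumeB, if_pos h1, if_pos ha] at h
        cases h
      · simp only [consumeB, if_pos h1, if_neg ha, Option.some.injEq] at h
        subst h
        simp only [consumeB, if_pos h1, if_neg ha]

-- on a complete ordering every pending constraint is checkable,
-- so a stable residual means A's loop finishes without break
theorem consume_full (s : List String) (hfull : ∀ x ∈ bLET, x ∈ s) :
    ∀ pend p', consumeB s pend = some p' → checkA s pend = true := by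
  intro pend
  induction pend with
  | nil => intro p' _; rfl
  | cons v rest ih =>
    intro p' h
    by_cases h1 : v.1 ∈ s
    · by_cases h2 : v.2.2.1 ∈ s
      · obtain ⟨i, hi⟩ := Option.isSome_iff_exists.mp ((PySem.List.index?_isSome_iff s v.1).mpr h1)
        obtain ⟨j, hj⟩ := Option.isSome_iff_exists.mp ((PySem.List.index?_isSome_iff s v.2.2.1).mpr h2)
        have hg : ¬ (v.1 ∉ s ∨ v.2.2.1 ∉ s) := by simp [h1, h2]
        simp only [consumeB, if_neg (not_not_intro h1), if_neg (not_not_intro h2), hi, hj] at h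
        simp only [checkA, if_neg hg, hi, hj]
        cases hd : PySem.Int.ofStr? v.2.2.2.2 with
        | none => rw [hd] at h; cases h
        | some dv =>
          rw [hd] at h
          simp only [] at h
          split at h
          · cases h
          · split at h
            · cases h
            · split at h
              · cases h
              · rename_i c1 c2 c3
                simp only [c1, c2, c3, Bool.false_eq_true, if_false]
                exact ih p' h
      · by_cases hb : v.2.2.1 ∉ bLET
        · simp only [consumeB, if_neg (not_not_intro h1), if_pos h2, if_pos hb] at h
          cases h
        · exact absurd (hfull _ (not_not.mp hb)) h2
    · by_cases ha : v.1 ∉ bLET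
      · simp only [consumeB, if_pos h1, if_pos ha] at h
        cases h
      · exact absurd (hfull _ (not_not.mp ha)) h1

-- the body of bt's loop as a sum over the not-yet-placed letters
theorem btB_foldl_sum (k : Nat) (s : List String)
    (pend : List (String × String × String × String × String)) :
    ∀ (l : List String) (t : Int),
      l.foldl (fun t a =>
        if a ∈ s then t
        else match consumeB (s ++ [a]) pend with
          | none => t
          | some p2 => t + btB k (s ++ [a]) p2) t
      = t + ((l.filter (fun x => x ∉ s)).map
              (fun a => match consumeB (s ++ [a]) pend with
                | none => 0
                | some p2 => btB k (s ++ [a]) p2)).sum := by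
  intro l
  induction l with
  | nil => simp
  | cons a l ih =>
    intro t
    by_cases ha : a ∈ s
    · simp [ha, ih]
    · cases hc : consumeB (s ++ [a]) pend with
      | none => simp [ha, hc, ih]
      | some p2 => simp [ha, hc, ih]; ring

theorem btB_eq :
    ∀ (k : Nat) (s : List String) (pend : List (String × String × String × String × String)),
      s.Nodup → (∀ x ∈ s, x ∈ bLET) →
      (bLET.filter (fun x => x ∉ s)).length = k →
      consumeB s pend = some pend →
      btB k s pend
        = (((PySem.List.permutations (bLET.filter (fun x => x ∉ s)) k).filter
              (fun ext => checkA (s ++ ext) pend)).length : Int) := by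
  intro k
  induction k with
  | zero =>
    intro s pend hnd hsub hlen hstable
    have hnil : bLET.filter (fun x => x ∉ s) = [] := List.length_eq_zero_iff.mp hlen
    have hfull : ∀ x ∈ bLET, x ∈ s := by
      intro x hx
      by_contra hxs
      have : x ∈ bLET.filter (fun x => x ∉ s) := List.mem_filter.mpr ⟨hx, by simpa using hxs⟩
      rw [hnil] at this; cases this
    have hchk := consume_full s hfull pend pend hstable
    rw [hnil]
    simp [btB, PySem.List.permutations, hchk]
  | succ k ih =>
    intro s pend hnd hsub hlen hstable
    have hremnd : (bLET.filter (fun x => x ∉ s)).Nodup := bLET_nodup.filter _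
    rw [show btB (k + 1) s pend
        = bLET.foldl (fun t a =>
            if a ∈ s then t
            else match consumeB (s ++ [a]) pend with
              | none => t
              | some p2 => t + btB k (s ++ [a]) p2) 0 from rfl]
    rw [btB_foldl_sum k s pend bLET 0, zero_add]
    rw [perms_succ]
    rw [len_filter_flatMap (fun q => (PySem.List.permutations q.2 k).map (q.1 :: ·))
        (fun ext => checkA (s ++ ext) pend) (selP (bLET.filter (fun x => x ∉ s)))]
    rw [Nat.cast_list_sum, List.map_map]
    congr 1
    conv_lhs => rw [← selP_map_fst (bLET.filter (fun x => x ∉ s)), List.map_map]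
    apply List.map_congr_left
    intro q hq
    obtain ⟨hq1, hq2⟩ := selP_mem hremnd q hq
    obtain ⟨hqL, hqs⟩ : q.1 ∈ bLET ∧ q.1 ∉ s := by
      have := List.mem_filter.mp hq1
      exact ⟨this.1, by simpa using this.2⟩
    have hnd' : (s ++ [q.1]).Nodup := by
      simp only [List.nodup_append, hnd, List.nodup_cons, List.not_mem_nil,
        not_false_iff, List.nodup_nil, and_true, true_and]
      intro a ha b hb
      rw [List.mem_singleton.mp hb]
      exact fun h => hqs (h ▸ ha)
    have hsub' : ∀ x ∈ s ++ [q.1], x ∈ bLET := by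
      intro x hx
      rcases List.mem_append.mp hx with h | h
      · exact hsub x h
      · rw [List.mem_singleton.mp h]; exact hqL
    have herase : q.2 = bLET.filter (fun x => x ∉ s ++ [q.1]) := by
      rw [hq2, List.Nodup.erase_eq_filter hremnd q.1, List.filter_filter]
      exact List.filter_congr (by
        intro x hx
        by_cases h1 : x = q.1 <;> by_cases h2 : x ∈ s <;> simp [h1, h2])
    have hlen' : (bLET.filter (fun x => x ∉ s ++ [q.1])).length = k := by
      rw [← herase, hq2, List.length_erase_of_mem hq1, hlen]
      omega
    -- every ordering in this branch is s ++ q.1 :: ext with ext a permutation of the rest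
    have hqperm : ∀ ext ∈ PySem.List.permutations q.2 k,
        (∀ x : String, x ∈ s ++ q.1 :: ext ↔ x ∈ bLET) := by
      intro ext hext x
      have hq2len : q.2.length = k := by rw [herase]; exact hlen'
      have hext' : ext ∈ PySem.List.permutations q.2 q.2.length := by
        rw [hq2len]; exact hext
      have hperm := PySem.List.perm_of_mem_permutations hext'
      constructor
      · intro hx
        rcases List.mem_append.mp hx with h | h
        · exact hsub x h
        · rcases List.mem_cons.mp h with rfl | h
          · exact hqL
          · have : x ∈ q.2 := hperm.mem_iff.mp h
            rw [herase] at this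
            exact (List.mem_filter.mp this).1
      · intro hx
        by_cases hxs : x ∈ s ++ [q.1]
        · rcases List.mem_append.mp hxs with h | h
          · exact List.mem_append.mpr (Or.inl h)
          · exact List.mem_append.mpr (Or.inr (List.mem_cons.mpr (Or.inl (List.mem_singleton.mp h))))
        · have : x ∈ q.2 := by
            rw [herase]
            exact List.mem_filter.mpr ⟨hx, by simpa using hxs⟩
          exact List.mem_append.mpr (Or.inr (List.mem_cons.mpr (Or.inr (hperm.mem_iff.mpr this))))
    have hsidx : ∀ ext, ∀ x ∈ s ++ [q.1],
        PySem.List.index? (s ++ q.1 :: ext) x = PySem.List.index? (s ++ [q.1]) x := by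
      intro ext x hx
      rw [List.append_cons]
      exact PySem.List.index?_append_of_mem ext hx
    simp only [Function.comp_def, List.filter_map, List.length_map]
    cases hc : consumeB (s ++ [q.1]) pend with
    | none =>
      have hzero : (PySem.List.permutations q.2 k).filter
          (fun ext => checkA (s ++ q.1 :: ext) pend) = [] := by
        apply List.filter_eq_nil_iff.mpr
        intro ext hext
        have := consume_checkA (s ++ q.1 :: ext) (hqperm ext hext) (s ++ [q.1]) (hsidx ext) pend
        rw [hc] at this
        simp [this]
      rw [hzero]
      rfl
    | some p2 =>
      have hcongr : (PySem.List.permutations q.2 k).filter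
            (fun ext => checkA (s ++ q.1 :: ext) pend)
          = (PySem.List.permutations q.2 k).filter
            (fun ext => checkA ((s ++ [q.1]) ++ ext) p2) := by
        apply List.filter_congr
        intro ext hext
        have := consume_checkA (s ++ q.1 :: ext) (hqperm ext hext) (s ++ [q.1]) (hsidx ext) pend
        rw [hc] at this
        rw [this, List.append_cons]
      rw [hcongr]
      show btB k (s ++ [q.1]) p2
          = ((List.filter (fun ext => checkA ((s ++ [q.1]) ++ ext) p2)
              (PySem.List.permutations q.2 k)).length : Int)
      rw [herase]
      exact ih (s ++ [q.1]) p2 hnd' hsub' hlen' (consume_idem (s ++ [q.1]) pend p2 hc)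

theorem solution_spec : Claim_equal_solution := by
  intro n data _hdom _hpre
  unfold Spec_solution
  have hperm : ∀ p ∈ PySem.List.permutations alphaA 8, ∀ x : String, x ∈ p ↔ x ∈ bLET := by
    intro p hp x
    have hp8 : p ∈ PySem.List.permutations bLET bLET.length := hp
    exact (PySem.List.perm_of_mem_permutations hp8).mem_iff
  unfold solution
  rw [foldl_count, zero_add]
  cases hc : consumeB [] data with
  | none =>
    simp only [solution_alt, hc]
    have h0 : (PySem.List.permutations alphaA 8).countP (fun p => checkA p data) = 0 := by
      apply List.countP_eq_zero.mpr
      intro p hp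
      have := consume_checkA p (hperm p hp) [] (by intro x hx; cases hx) data
      rw [hc] at this
      simp [this]
    rw [h0]; rfl
  | some p0 =>
    simp only [solution_alt, hc]
    have hcong : (PySem.List.permutations alphaA 8).countP (fun p => checkA p data)
        = (PySem.List.permutations alphaA 8).countP (fun p => checkA p p0) := by
      apply List.countP_congr
      intro p hp
      have := consume_checkA p (hperm p hp) [] (by intro x hx; cases hx) data
      rw [hc] at this
      rw [this]
    rw [hcong]
    have hbt := btB_eq 8 [] p0 List.nodup_nil (by intro x hx; cases hx) (by decide)
      (consume_idem [] data p0 hc)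
    have hfe : bLET.filter (fun x => x ∉ ([] : List String)) = bLET := by decide
    rw [hfe] at hbt
    rw [hbt, List.countP_eq_length_filter]
    norm_num
    rfl
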